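-- pv_equiv track=rewrite | github.com/anupkalburgi/snippets | python/one_typo.py | same_count
-- ===== SOURCE A (Python) =====
-- def same_count(s1, s2, cnt):
--     """
--     return the count of elements that are same in both the string
--     """
--     if not s1 or not s2:
--         return cnt
--     else:
--         (s1h, s1t) = s1[0], s1[1:]
--         (s2h, s2t) = s2[0], s2[1:]
--         if s1h != s2h:
--             return cnt
--         else:
--             return same_count(s1t, s2t, cnt+1)
-- ===== SOURCE B (Python) =====
-- def same_count(s1, s2, cnt):
--     i = 0
--     for a, b in zip(s1, s2):
--         if a != b:
--             break
--         i += 1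
--     return cnt + i
-- ===== Notes on version B (the rewrite author's own statement) =====
-- stated objective: faster
-- what changed: Replaced the recursion that rebuilds both string tails by slicing at every step with a single linear pass over the zipped characters that counts the common prefix and adds it to cnt once.
import Mathlib
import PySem

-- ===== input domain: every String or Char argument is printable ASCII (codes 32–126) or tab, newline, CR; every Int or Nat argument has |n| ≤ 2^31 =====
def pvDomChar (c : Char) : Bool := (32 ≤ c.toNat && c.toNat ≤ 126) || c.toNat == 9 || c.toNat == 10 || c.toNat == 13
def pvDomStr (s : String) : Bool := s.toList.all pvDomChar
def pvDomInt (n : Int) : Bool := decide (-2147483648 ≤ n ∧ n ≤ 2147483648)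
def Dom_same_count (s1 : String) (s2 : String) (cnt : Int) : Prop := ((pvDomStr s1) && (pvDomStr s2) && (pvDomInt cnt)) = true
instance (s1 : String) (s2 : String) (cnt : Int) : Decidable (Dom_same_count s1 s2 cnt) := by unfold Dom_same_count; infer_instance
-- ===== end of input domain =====

-- B replaces A's slice-and-recurse descent with one linear pass over the zipped characters (objective: faster).

-- ===== PORT A =====
-- A's recursion: empty check, split head/tail (slicing), compare heads, recurse on tails with cnt+1.
def sameCountRecA : List Char → List Char → Int → Int
  | [], _, cnt => cnt
  | _ :: _, [], cnt => cnt
  | h1 :: t1, h2 :: t2, cnt => if h1 ≠ h2 then cnt else sameCountRecA t1 t2 (cnt + 1)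

def same_count (s1 : String) (s2 : String) (cnt : Int) : Int :=
  sameCountRecA s1.toList s2.toList cnt

-- ===== PORT B =====
-- B's loop: i = 0; for (a,b) in zip(s1,s2): if a != b: break; i += 1; return cnt + i
def sameCountLoopB : List (Char × Char) → Int → Int
  | [], i => i
  | (a, b) :: rest, i => if a ≠ b then i else sameCountLoopB rest (i + 1)

def same_count_alt (s1 : String) (s2 : String) (cnt : Int) : Int :=
  cnt + sameCountLoopB (s1.toList.zip s2.toList) 0

-- ===== PRECONDITION & SPEC =====
def Spec_same_count (s1 : String) (s2 : String) (cnt : Int) (out : Int) : Prop := out = same_count_alt s1 s2 cnt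
instance (s1 : String) (s2 : String) (cnt : Int) (out : Int) : Decidable (Spec_same_count s1 s2 cnt out) := by unfold Spec_same_count; infer_instance

-- ===== CLAIM (what is proved, stated in full; the proofs are below) =====
def Claim_equal_same_count : Prop := ∀ (s1 : String) (s2 : String) (cnt : Int), Dom_same_count s1 s2 cnt → Spec_same_count s1 s2 cnt (same_count s1 s2 cnt)

-- ===== LEMMAS AND PROOFS =====

theorem sameCountLoopB_shift (zs : List (Char × Char)) (i : Int) :
    sameCountLoopB zs i = i + sameCountLoopB zs 0 := by
  induction zs generalizing i with
  | nil => simp [sameCountLoopB]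
  | cons p rest ih =>
    obtain ⟨a, b⟩ := p
    by_cases h : a = b
    · simp only [sameCountLoopB, h, ne_eq, not_true_eq_false, if_false]
      rw [ih (i + 1), ih (0 + 1)]
      ring
    · simp [sameCountLoopB, h]

theorem recA_eq_loopB (l1 l2 : List Char) (cnt : Int) :
    sameCountRecA l1 l2 cnt = cnt + sameCountLoopB (l1.zip l2) 0 := by
  induction l1 generalizing l2 cnt with
  | nil => simp [sameCountRecA, sameCountLoopB]
  | cons h1 t1 ih =>
    cases l2 with
    | nil => simp [sameCountRecA, sameCountLoopB]
    | cons h2 t2 =>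
      by_cases h : h1 = h2
      · simp only [sameCountRecA, List.zip_cons_cons, sameCountLoopB, h, ne_eq,
          not_true_eq_false, if_false]
        rw [ih t2 (cnt + 1), sameCountLoopB_shift (t1.zip t2) (0 + 1)]
        ring
      · simp [sameCountRecA, sameCountLoopB, h]

-- ===== VERDICT (by name: the statement is the Claim_ definition above) =====
theorem same_count_spec : Claim_equal_same_count := by
  intro s1 s2 cnt _
  unfold Spec_same_count same_count same_count_alt
  exact recA_eq_loopB _ _ _
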